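-- pv_equiv track=rewrite | github.com/yanmingsohu/re2re | utils.py | asm_string_len
-- ===== SOURCE A (Python) =====
-- def asm_string_len(s: str) -> int:
--     """
--     计算 MASM 字符串长度（支持 ' 和 "，支持 '' / "" 转义）
--     只处理一个字符串字面量
--     """
--     s = s.strip()
--     if not s:
--         return 0
--
--     quote = s[0]
--     if quote not in ("'", '"'):
--         raise ValueError("不是合法的 asm 字符串")
--
--     if s[-1] != quote:
--         raise ValueError("字符串未正确闭合")
--
--     i = 1
--     n = 0
--     end = len(s) - 1
--
--     while i < end:
--         # 处理 '' 或 ""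
--         if i + 1 < end and s[i] == quote and s[i + 1] == quote:
--             n += 1
--             i += 2
--         else:
--             n += 1
--             i += 1
--     return n
-- ===== SOURCE B (Python) =====
-- def asm_string_len(s: str) -> int:
--     """
--     计算 MASM 字符串长度（支持 ' 和 "，支持 '' / "" 转义）
--     只处理一个字符串字面量
--     """
--     s = s.strip()
--     if not s:
--         return 0
--
--     quote = s[0]
--     if quote not in ("'", '"'):
--         raise ValueError("不是合法的 asm 字符串")
--
--     if s[-1] != quote:
--         raise ValueError("字符串未正确闭合")
--
--     # De-escape the interior ('' / "" -> one quote) and measure it.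
--     return len(s[1:-1].replace(quote * 2, quote))
-- ===== Notes on version B (the rewrite author's own statement) =====
-- stated objective: simpler
-- what changed: The index-walking while loop that counts characters one or two at a time is replaced by de-escaping the interior slice with str.replace(quote*2, quote) and returning its length.
import Mathlib
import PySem

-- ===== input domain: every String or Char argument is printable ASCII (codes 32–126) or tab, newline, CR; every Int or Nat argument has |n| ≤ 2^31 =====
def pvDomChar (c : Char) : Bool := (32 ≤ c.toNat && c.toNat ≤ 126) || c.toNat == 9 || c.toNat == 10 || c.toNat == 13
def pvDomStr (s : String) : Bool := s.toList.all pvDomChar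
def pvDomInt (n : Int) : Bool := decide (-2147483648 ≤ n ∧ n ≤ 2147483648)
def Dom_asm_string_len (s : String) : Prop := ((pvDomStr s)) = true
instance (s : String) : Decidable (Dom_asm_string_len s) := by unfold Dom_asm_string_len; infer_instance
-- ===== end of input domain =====

-- B replaces A's index-walking counting loop by de-escaping the interior slice
-- with str.replace(quote*2, quote) and returning its length (objective: simpler).

-- ===== PORT A =====
-- the while loop of A: i walks the stripped string, a pair of quotes counts once
def asmLoopA (q : Char) (cs : List Char) (endd : Nat) (i n : Nat) : Nat :=
  if _h : i < endd then
    if i + 1 < endd ∧ cs.getD i ' ' = q ∧ cs.getD (i + 1) ' ' = q then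
      asmLoopA q cs endd (i + 2) (n + 1)
    else
      asmLoopA q cs endd (i + 1) (n + 1)
  else n
termination_by endd - i

def asm_string_len (s : String) : Int :=
  let cs := PySem.Chars.strip s.toList
  match cs with
  | [] => 0                                   -- if not s: return 0
  | q :: _ =>
    if ¬(q = '\'' ∨ q = '"') then 0           -- raise ValueError (excluded by Pre_)
    else if cs.getLast? ≠ some q then 0       -- raise ValueError (excluded by Pre_)
    else ((asmLoopA q cs (cs.length - 1) 1 0 : Nat) : Int)

-- ===== PORT B =====
def asm_string_len_alt (s : String) : Int :=
  let cs := PySem.Chars.strip s.toList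
  match cs with
  | [] => 0                                   -- if not s: return 0
  | q :: _ =>
    if ¬(q = '\'' ∨ q = '"') then 0           -- raise ValueError (excluded by Pre_)
    else if cs.getLast? ≠ some q then 0       -- raise ValueError (excluded by Pre_)
    else ((PySem.Chars.replace (PySem.List.slice cs (some 1) (some (-1))) [q, q] [q]).length : Int)

-- ===== PRECONDITION & SPEC =====
-- Pre_ excludes exactly the inputs on which A raises ValueError (B raises there too):
-- a non-empty stripped string whose first character is not a quote, or whose last
-- character differs from its first.
def Pre_asm_string_len (s : String) : Prop :=
  PySem.Chars.strip s.toList = [] ∨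
    ((PySem.Chars.strip s.toList).head? = some '\'' ∨ (PySem.Chars.strip s.toList).head? = some '"') ∧
      (PySem.Chars.strip s.toList).getLast? = (PySem.Chars.strip s.toList).head?
instance (s : String) : Decidable (Pre_asm_string_len s) := by unfold Pre_asm_string_len; infer_instance

def pvWitness_asm_string_len : String := "'ab''c'"

def Spec_asm_string_len (s : String) (out : Int) : Prop := out = asm_string_len_alt s
instance (s : String) (out : Int) : Decidable (Spec_asm_string_len s out) := by unfold Spec_asm_string_len; infer_instance

-- ===== CLAIM (what is proved, stated in full; the proofs are below) =====
def Claim_equal_asm_string_len : Prop := ∀ (s : String), Dom_asm_string_len s → Pre_asm_string_len s → Spec_asm_string_len s (asm_string_len s)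

-- ===== LEMMAS AND PROOFS =====

-- structural count both sides reduce to: the de-escaped length of the interior
def pairCount (q : Char) : List Char → Nat
  | [] => 0
  | [_] => 1
  | a :: b :: r => if a = q ∧ b = q then 1 + pairCount q r else 1 + pairCount q (b :: r)

lemma take_drop_two (cs : List Char) (i k : Nat) (h1 : i + 1 < cs.length) (h2 : 2 ≤ k) :
    (cs.drop i).take k = cs[i]'(by omega) :: cs[i+1]'h1 :: (cs.drop (i+2)).take (k - 2) := by
  obtain ⟨k', rfl⟩ : ∃ k', k = k' + 2 := ⟨k - 2, by omega⟩
  rw [List.drop_eq_getElem_cons (show i < cs.length by omega)]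
  rw [List.drop_eq_getElem_cons (show i + 1 < cs.length from h1)]
  simp only [List.take_succ_cons, Nat.add_sub_cancel]

lemma take_drop_one (cs : List Char) (i k : Nat) (h1 : i < cs.length) (h2 : 1 ≤ k) :
    (cs.drop i).take k = cs[i]'h1 :: (cs.drop (i+1)).take (k - 1) := by
  obtain ⟨k', rfl⟩ : ∃ k', k = k' + 1 := ⟨k - 1, by omega⟩
  rw [List.drop_eq_getElem_cons h1]
  simp only [List.take_succ_cons, Nat.add_sub_cancel]

-- A's loop counts pairCount of the window [i, endd) of cs
lemma asmLoopA_eq (q : Char) (cs : List Char) (endd : Nat) (hend : endd ≤ cs.length)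
    (i n : Nat) : asmLoopA q cs endd i n = n + pairCount q ((cs.drop i).take (endd - i)) := by
  fun_induction asmLoopA q cs endd i n with
  | case1 i n h hc ih =>
    obtain ⟨h2, hq1, hq2⟩ := hc
    have hi1 : i + 1 < cs.length := by omega
    rw [take_drop_two cs i (endd - i) hi1 (by omega)]
    rw [List.getD_eq_getElem cs ' ' (by omega)] at hq1
    rw [List.getD_eq_getElem cs ' ' hi1] at hq2
    rw [show endd - (i + 2) = endd - i - 2 from by omega] at ih
    rw [ih]
    simp [pairCount, hq1, hq2]
    omega
  | case2 i n h hc ih =>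
    have hi : i < cs.length := by omega
    rw [take_drop_one cs i (endd - i) hi (by omega)]
    rw [ih]
    by_cases h2 : i + 1 < endd
    · have hi1 : i + 1 < cs.length := by omega
      have hnp : ¬(cs[i]'hi = q ∧ cs[i+1]'hi1 = q) := by
        intro hcontra
        apply hc
        refine ⟨h2, ?_, ?_⟩
        · rw [List.getD_eq_getElem cs ' ' hi]; exact hcontra.1
        · rw [List.getD_eq_getElem cs ' ' hi1]; exact hcontra.2
      rw [take_drop_one cs (i+1) (endd - (i+1)) hi1 (by omega)]
      rw [take_drop_one cs (i+1) (endd - i - 1) hi1 (by omega)]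
      simp only [pairCount, hnp, if_false]
      have : endd - (i + 1) - 1 = endd - i - 1 - 1 := by omega
      rw [this]
      omega
    · have he : endd - i = 1 := by omega
      have he2 : endd - (i + 1) = 0 := by omega
      rw [he2]
      simp [he, pairCount]
  | case3 i n h =>
    have : endd - i = 0 := by omega
    simp [this, pairCount]

-- str.replace(quote*2, quote) shortens the string by exactly one per replaced pair
lemma go_len (q : Char) (fuel : Nat) : ∀ (t acc : List Char), t.length ≤ fuel →
    (PySem.Chars.replace.go [q, q] [q] fuel t acc).length = acc.length + pairCount q t := by
  induction fuel with
  | zero =>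
    intro t acc h
    have ht : t = [] := List.eq_nil_of_length_eq_zero (Nat.le_zero.mp h)
    subst ht
    simp [PySem.Chars.replace.go, pairCount]
  | succ n ih =>
    intro t acc h
    match t with
    | [] => simp [PySem.Chars.replace.go, pairCount]
    | [c] =>
      have hpre : ([q, q].isPrefixOf [c]) = false := by
        simp [List.isPrefixOf]
      rw [PySem.Chars.replace.go]
      simp only [hpre, Bool.false_eq_true, if_false]
      rw [ih [] (c :: acc) (by simp)]
      simp [pairCount]
    | c :: b :: r =>
      rw [PySem.Chars.replace.go]
      by_cases hc : c = q ∧ b = q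
      · have hpre : ([q, q].isPrefixOf (c :: b :: r)) = true := by
          simp [List.isPrefixOf, hc.1, hc.2]
        simp only [hpre, if_true, List.length_cons, List.length_nil, List.drop_succ_cons,
          List.drop_zero, List.reverse_singleton, List.singleton_append]
        rw [ih r (q :: acc) (by simp at h ⊢; omega)]
        simp [pairCount, hc]
        omega
      · have hpre : ([q, q].isPrefixOf (c :: b :: r)) = false := by
          simp [List.isPrefixOf]
          intro h1 h2
          exact absurd ⟨h1.symm, h2.symm⟩ hc
        simp only [hpre, Bool.false_eq_true, if_false]
        rw [ih (b :: r) (c :: acc) (by simp at h ⊢; omega)]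
        simp [pairCount, hc]
        omega

lemma replace_len_eq (q : Char) (t : List Char) :
    (PySem.Chars.replace t [q, q] [q]).length = pairCount q t := by
  have : ([q, q] : List Char).isEmpty = false := by simp
  rw [PySem.Chars.replace, this]
  simpa using go_len q t.length t [] (le_refl _)

lemma slice_interior (cs : List Char) :
    PySem.List.slice cs (some 1) (some (-1)) = (cs.drop 1).dropLast := by
  cases cs with
  | nil => rfl
  | cons a t => simp [PySem.List.slice, List.dropLast_eq_take]

-- ===== VERDICT (by name: the statement is the Claim_ definition above) =====
theorem asm_string_len_spec : Claim_equal_asm_string_len := by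
  intro s _ _
  unfold Spec_asm_string_len asm_string_len asm_string_len_alt
  cases hcs : PySem.Chars.strip s.toList with
  | nil => rfl
  | cons q rest =>
    simp only
    by_cases h1 : q = '\'' ∨ q = '"'
    · by_cases h2 : (q :: rest).getLast? = some q
      · simp only [h1, h2, not_true_eq_false, if_false, ne_eq]
        rw [asmLoopA_eq q (q :: rest) ((q :: rest).length - 1) (by simp) 1 0]
        rw [slice_interior, replace_len_eq]
        simp [List.dropLast_eq_take]
      · simp [h1, h2]
    · simp [h1]
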